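-- pv_equiv track=rewrite | github.com/gridvisi/Python_workspace | 2 Project_base_learning/处理网址/6 kyu _com_gov_org_first.py | order_by_domain
-- ===== SOURCE A (Python) =====
-- def exten(link):
--     ext=link.split('.')[-1]
--     return ext
--
-- def order_by_domain(addresses):
--     com=[]
--     gov=[]
--     org=[]
--     res=[]
--     for i in addresses:
--         i+=' '
--         if ".com " in i or ".com/" in i:
--             com.append(i[:-1])
--         elif ".gov " in i or ".gov/" in i:
--             gov.append(i[:-1])
--         elif ".org " in i or ".org/" in i:
--             org.append(i[:-1])
--         else:
--             res.append(i[:-1])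
--     return sorted(com)+sorted(gov)+sorted(org)+sorted(res,key=exten)
-- ===== SOURCE B (Python) =====
-- def order_by_domain(addresses):
--     def key(a):
--         p = a + ' '
--         if ".com " in p or ".com/" in p:
--             return (0, a)
--         if ".gov " in p or ".gov/" in p:
--             return (1, a)
--         if ".org " in p or ".org/" in p:
--             return (2, a)
--         return (3, a.split('.')[-1])
--     return sorted(addresses, key=key)
-- ===== Notes on version B (the rewrite author's own statement) =====
-- stated objective: idiomatic
-- what changed: A builds four bucket lists in a loop and concatenates four separate sorts; B does one stable sort of the whole list under a (priority, secondary-key) tuple, where the priority replays A's com/gov/org membership tests and the secondary key is the address itself or, for the 'other' bucket, its extension.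
import Mathlib
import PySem

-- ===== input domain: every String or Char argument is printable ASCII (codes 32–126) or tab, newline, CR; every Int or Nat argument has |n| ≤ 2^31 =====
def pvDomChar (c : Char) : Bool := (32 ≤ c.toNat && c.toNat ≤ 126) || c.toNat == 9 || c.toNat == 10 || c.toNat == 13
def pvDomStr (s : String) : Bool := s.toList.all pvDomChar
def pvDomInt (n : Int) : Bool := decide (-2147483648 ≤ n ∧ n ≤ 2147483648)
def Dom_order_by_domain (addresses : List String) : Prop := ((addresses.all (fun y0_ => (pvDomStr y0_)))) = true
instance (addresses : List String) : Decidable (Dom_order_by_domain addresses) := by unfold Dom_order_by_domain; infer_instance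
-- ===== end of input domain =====

-- B replaces A's four bucket lists and four sorts by one stable sort under a (priority, secondary) key (objective: idiomatic/alternative).

-- ===== PORT A =====
-- exten(link): link.split('.')[-1].  split('.') is never empty, so the .getD defaults are unreachable.
def exten (link : String) : String :=
  (PySem.List.pyGet? ((PySem.Str.split? link ".").getD []) (-1)).getD ""

-- one iteration of A's for-loop over the state (com, gov, org, res)
def aStep (st : List String × List String × List String × List String) (i : String) :
    List String × List String × List String × List String :=
  let i' := i ++ " "
  if PySem.Str.isIn ".com " i' || PySem.Str.isIn ".com/" i' then
    (st.1 ++ [PySem.Str.slice i' none (some (-1))], st.2.1, st.2.2.1, st.2.2.2)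
  else if PySem.Str.isIn ".gov " i' || PySem.Str.isIn ".gov/" i' then
    (st.1, st.2.1 ++ [PySem.Str.slice i' none (some (-1))], st.2.2.1, st.2.2.2)
  else if PySem.Str.isIn ".org " i' || PySem.Str.isIn ".org/" i' then
    (st.1, st.2.1, st.2.2.1 ++ [PySem.Str.slice i' none (some (-1))], st.2.2.2)
  else
    (st.1, st.2.1, st.2.2.1, st.2.2.2 ++ [PySem.Str.slice i' none (some (-1))])

def order_by_domain (addresses : List String) : List String :=
  let st := addresses.foldl aStep ([], [], [], [])
  PySem.List.sorted st.1 (fun x => x) ++ PySem.List.sorted st.2.1 (fun x => x) ++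
    PySem.List.sorted st.2.2.1 (fun x => x) ++ PySem.List.sorted st.2.2.2 exten

-- ===== PORT B =====
-- the two components of Source B's key(a) tuple
def bKey1 (a : String) : Int :=
  if PySem.Str.isIn ".com " (a ++ " ") || PySem.Str.isIn ".com/" (a ++ " ") then 0
  else if PySem.Str.isIn ".gov " (a ++ " ") || PySem.Str.isIn ".gov/" (a ++ " ") then 1
  else if PySem.Str.isIn ".org " (a ++ " ") || PySem.Str.isIn ".org/" (a ++ " ") then 2
  else 3

def bKey2 (a : String) : String :=
  if PySem.Str.isIn ".com " (a ++ " ") || PySem.Str.isIn ".com/" (a ++ " ") then a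
  else if PySem.Str.isIn ".gov " (a ++ " ") || PySem.Str.isIn ".gov/" (a ++ " ") then a
  else if PySem.Str.isIn ".org " (a ++ " ") || PySem.Str.isIn ".org/" (a ++ " ") then a
  else (PySem.List.pyGet? ((PySem.Str.split? a ".").getD []) (-1)).getD ""

def order_by_domain_alt (addresses : List String) : List String :=
  PySem.List.sorted2 addresses bKey1 bKey2

-- ===== PRECONDITION & SPEC =====
def Spec_order_by_domain (addresses : List String) (out : List String) : Prop := out = order_by_domain_alt addresses
instance (addresses : List String) (out : List String) : Decidable (Spec_order_by_domain addresses out) := by unfold Spec_order_by_domain; infer_instance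

-- ===== CLAIM (what is proved, stated in full; the proofs are below) =====
def Claim_equal_order_by_domain : Prop := ∀ (addresses : List String), Dom_order_by_domain addresses → Spec_order_by_domain addresses (order_by_domain addresses)

-- ===== LEMMAS AND PROOFS =====

-- the lexicographic 'before' relation sorted2 uses (reverse = false)
def before2 (a b : String) : Bool :=
  decide (bKey1 a < bKey1 b) || (!decide (bKey1 b < bKey1 a) && decide (bKey2 a < bKey2 b))

theorem sorted2_eq_foldl (xs : List String) :
    PySem.List.sorted2 xs bKey1 bKey2
      = xs.foldl (fun acc x => PySem.List.insertBy before2 x acc) [] := rfl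

theorem slice_pad (i : String) : PySem.Str.slice (i ++ " ") none (some (-1)) = i := by
  have h := PySem.Str.slice_to_neg_one (i ++ " ")
  have h2 : (i ++ " ").toList = i.toList ++ [' '] := by simp
  rw [h2] at h
  simp at h
  exact String.toList_inj.mp (by simpa using h)

theorem bKey1_range (a : String) : bKey1 a = 0 ∨ bKey1 a = 1 ∨ bKey1 a = 2 ∨ bKey1 a = 3 := by
  unfold bKey1; split_ifs <;> simp

theorem insertBy_append_left {α : Type} (before : α → α → Bool) (x : α) (L R : List α)
    (h : ∀ y ∈ R, before x y = true) :
    PySem.List.insertBy before x (L ++ R) = PySem.List.insertBy before x L ++ R := by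
  induction L with
  | nil =>
    cases R with
    | nil => rfl
    | cons r rs => simp [PySem.List.insertBy, h r (by simp)]
  | cons l ls ih =>
    by_cases hl : before x l = true <;> simp [PySem.List.insertBy, hl, ih]

theorem insertBy_append_right {α : Type} (before : α → α → Bool) (x : α) (L R : List α)
    (h : ∀ y ∈ L, before x y = false) :
    PySem.List.insertBy before x (L ++ R) = L ++ PySem.List.insertBy before x R := by
  induction L with
  | nil => rfl
  | cons l ls ih =>
    have hl := h l (by simp)
    simp [PySem.List.insertBy, hl]
    exact ih (fun y hy => h y (by simp [hy]))

theorem insertBy_congr {α : Type} (before before' : α → α → Bool) (x : α) (ys : List α)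
    (h : ∀ y ∈ ys, before x y = before' x y) :
    PySem.List.insertBy before x ys = PySem.List.insertBy before' x ys := by
  induction ys with
  | nil => rfl
  | cons y ys ih =>
    have hy := h y (by simp)
    by_cases hb : before x y = true <;>
      simp [PySem.List.insertBy, hb, hy ▸ hb, ih (fun z hz => h z (by simp [hz]))]

-- stable insertion sort splits along a priority cut q (true-priority strictly before false-priority)
theorem foldl_insertBy_partition {α : Type} (before : α → α → Bool) (q : α → Bool) (G : α → Prop)
    (H1 : ∀ x y, G x → G y → q x = true → q y = false → before x y = true)
    (H2 : ∀ x y, G x → G y → q x = false → q y = true → before x y = false)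
    (xs : List α) : ∀ (L R : List α), (∀ y ∈ xs, G y) → (∀ y ∈ L, G y ∧ q y = true) →
    (∀ y ∈ R, G y ∧ q y = false) →
    xs.foldl (fun acc x => PySem.List.insertBy before x acc) (L ++ R)
      = (xs.filter q).foldl (fun acc x => PySem.List.insertBy before x acc) L
        ++ (xs.filter (fun x => !q x)).foldl (fun acc x => PySem.List.insertBy before x acc) R := by
  induction xs with
  | nil => intro L R _ _ _; rfl
  | cons x xs ih =>
    intro L R hxs hL hR
    have hGx : G x := hxs x (by simp)
    by_cases hq : q x = true
    · have hstep : PySem.List.insertBy before x (L ++ R)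
          = PySem.List.insertBy before x L ++ R :=
        insertBy_append_left before x L R
          (fun y hy => H1 x y hGx (hR y hy).1 hq (hR y hy).2)
      have hfq : (x :: xs).filter q = x :: xs.filter q := by simp [hq]
      have hfnq : (x :: xs).filter (fun x => !q x) = xs.filter (fun x => !q x) := by simp [hq]
      rw [List.foldl_cons, hstep, hfq, hfnq, List.foldl_cons]
      exact ih (PySem.List.insertBy before x L) R
        (fun y hy => hxs y (by simp [hy]))
        (fun y hy => by
          rcases (PySem.List.mem_insertBy before x y L).1 hy with h | h
          · exact h ▸ ⟨hGx, hq⟩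
          · exact hL y h) hR
    · have hq' : q x = false := by simpa using hq
      have hstep : PySem.List.insertBy before x (L ++ R)
          = L ++ PySem.List.insertBy before x R :=
        insertBy_append_right before x L R
          (fun y hy => H2 x y hGx (hL y hy).1 hq' (hL y hy).2)
      have hfq : (x :: xs).filter q = xs.filter q := by simp [hq']
      have hfnq : (x :: xs).filter (fun x => !q x) = x :: xs.filter (fun x => !q x) := by simp [hq']
      rw [List.foldl_cons, hstep, hfq, hfnq, List.foldl_cons]
      exact ih L (PySem.List.insertBy before x R)
        (fun y hy => hxs y (by simp [hy])) hL
        (fun y hy => by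
          rcases (PySem.List.mem_insertBy before x y R).1 hy with h | h
          · exact h ▸ ⟨hGx, hq'⟩
          · exact hR y h)

theorem foldl_insertBy_congr {α : Type} (before before' : α → α → Bool) (P : α → Prop)
    (H : ∀ a b, P a → P b → before a b = before' a b)
    (xs : List α) : ∀ (L : List α), (∀ y ∈ xs, P y) → (∀ y ∈ L, P y) →
    xs.foldl (fun acc x => PySem.List.insertBy before x acc) L
      = xs.foldl (fun acc x => PySem.List.insertBy before' x acc) L := by
  induction xs with
  | nil => intro L _ _; rfl
  | cons x xs ih =>
    intro L hxs hL
    have hx : P x := hxs x (by simp)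
    have h1 : PySem.List.insertBy before x L = PySem.List.insertBy before' x L :=
      insertBy_congr before before' x L (fun y hy => H x y hx (hL y hy))
    simp only [List.foldl_cons, h1]
    exact ih _ (fun y hy => hxs y (by simp [hy])) (fun y hy => by
      rcases (PySem.List.mem_insertBy before' x y L).1 hy with h | h
      · exact h ▸ hx
      · exact hL y h)

theorem before2_of_k1_lt (a b : String) (h : bKey1 a < bKey1 b) : before2 a b = true := by
  simp [before2, h]

theorem before2_of_k1_gt (a b : String) (h : bKey1 b < bKey1 a) : before2 a b = false := by
  simp [before2, h, not_lt_of_gt h]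

theorem before2_of_k1_eq (a b : String) (h : bKey1 a = bKey1 b) :
    before2 a b = decide (bKey2 a < bKey2 b) := by
  simp [before2, h]

theorem bKey2_of_ne_three (a : String) (h : bKey1 a ≠ 3) : bKey2 a = a := by
  unfold bKey1 at h; unfold bKey2; split_ifs at * <;> simp_all

theorem bKey2_of_three (a : String) (h : bKey1 a = 3) : bKey2 a = exten a := by
  unfold bKey1 at h; unfold bKey2 exten; split_ifs at * <;> simp_all

-- A's loop leaves each bucket equal to a filter of the input by priority
theorem loop_spec (xs : List String) : ∀ (c g o r : List String),
    xs.foldl aStep (c, g, o, r)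
      = (c ++ xs.filter (fun a => decide (bKey1 a = 0)),
         g ++ xs.filter (fun a => decide (bKey1 a = 1)),
         o ++ xs.filter (fun a => decide (bKey1 a = 2)),
         r ++ xs.filter (fun a => decide (bKey1 a = 3))) := by
  induction xs with
  | nil => intro c g o r; simp
  | cons x xs ih =>
    intro c g o r
    rw [List.foldl_cons]
    by_cases h0 : (PySem.Str.isIn ".com " (x ++ " ") || PySem.Str.isIn ".com/" (x ++ " ")) = true
    · have hk : bKey1 x = 0 := by unfold bKey1; rw [if_pos h0]
      have ha : aStep (c, g, o, r) x = (c ++ [x], g, o, r) := by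
        simp only [aStep]; rw [if_pos h0, slice_pad]
      rw [ha, ih]
      simp [hk, List.append_assoc]
    · by_cases h1 : (PySem.Str.isIn ".gov " (x ++ " ") || PySem.Str.isIn ".gov/" (x ++ " ")) = true
      · have hk : bKey1 x = 1 := by unfold bKey1; rw [if_neg h0, if_pos h1]
        have ha : aStep (c, g, o, r) x = (c, g ++ [x], o, r) := by
          simp only [aStep]; rw [if_neg h0, if_pos h1, slice_pad]
        rw [ha, ih]
        simp [hk, List.append_assoc]
      · by_cases h2 : (PySem.Str.isIn ".org " (x ++ " ") || PySem.Str.isIn ".org/" (x ++ " ")) = true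
        · have hk : bKey1 x = 2 := by unfold bKey1; rw [if_neg h0, if_neg h1, if_pos h2]
          have ha : aStep (c, g, o, r) x = (c, g, o ++ [x], r) := by
            simp only [aStep]; rw [if_neg h0, if_neg h1, if_pos h2, slice_pad]
          rw [ha, ih]
          simp [hk, List.append_assoc]
        · have hk : bKey1 x = 3 := by unfold bKey1; rw [if_neg h0, if_neg h1, if_neg h2]
          have ha : aStep (c, g, o, r) x = (c, g, o, r ++ [x]) := by
            simp only [aStep]; rw [if_neg h0, if_neg h1, if_neg h2, slice_pad]
          rw [ha, ih]
          simp [hk, List.append_assoc]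

-- within a constant-priority bucket the lexicographic insertion sort is sorting by the secondary key
theorem bucket_id (p : Int) (hp : p ≠ 3) (ys : List String) (h : ∀ y ∈ ys, bKey1 y = p) :
    ys.foldl (fun acc x => PySem.List.insertBy before2 x acc) []
      = PySem.List.sorted ys (fun x => x) := by
  have hs : PySem.List.sorted ys (fun x => x)
      = ys.foldl (fun acc x => PySem.List.insertBy (fun a b => decide (a < b)) x acc) [] := rfl
  rw [hs]
  exact foldl_insertBy_congr before2 (fun a b => decide (a < b)) (fun y => bKey1 y = p)
    (fun a b ha hb => by
      rw [before2_of_k1_eq a b (ha.trans hb.symm),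
          bKey2_of_ne_three a (ha ▸ hp), bKey2_of_ne_three b (hb ▸ hp)])
    ys [] h (by simp)

theorem bucket_ext (ys : List String) (h : ∀ y ∈ ys, bKey1 y = 3) :
    ys.foldl (fun acc x => PySem.List.insertBy before2 x acc) []
      = PySem.List.sorted ys exten := by
  have hs : PySem.List.sorted ys exten
      = ys.foldl (fun acc x => PySem.List.insertBy (fun a b => decide (exten a < exten b)) x acc) [] := rfl
  rw [hs]
  exact foldl_insertBy_congr before2 (fun a b => decide (exten a < exten b)) (fun y => bKey1 y = 3)
    (fun a b ha hb => by
      rw [before2_of_k1_eq a b (ha.trans hb.symm), bKey2_of_three a ha, bKey2_of_three b hb])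
    ys [] h (by simp)

-- ===== VERDICT (by name: the statement is the Claim_ definition above) =====
theorem order_by_domain_spec : Claim_equal_order_by_domain := by
  intro l _
  unfold Spec_order_by_domain order_by_domain order_by_domain_alt
  rw [sorted2_eq_foldl, loop_spec]
  simp only [List.nil_append]
  -- split off priority 0
  have s1 := foldl_insertBy_partition before2 (fun a => decide (bKey1 a = 0)) (fun _ => True)
      (fun x y _ _ hx hy => before2_of_k1_lt x y (by
        rcases bKey1_range y with h | h | h | h <;> simp_all))
      (fun x y _ _ hx hy => before2_of_k1_gt x y (by
        rcases bKey1_range x with h | h | h | h <;> simp_all))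
      l [] [] (by simp) (by simp) (by simp)
  rw [List.nil_append] at s1
  rw [s1]
  -- split off priority 1
  have s2 := foldl_insertBy_partition before2 (fun a => decide (bKey1 a = 1)) (fun y => bKey1 y ≠ 0)
      (fun x y hx hy h1 h2 => before2_of_k1_lt x y (by
        rcases bKey1_range y with h | h | h | h <;> simp_all))
      (fun x y hx hy h1 h2 => before2_of_k1_gt x y (by
        rcases bKey1_range x with h | h | h | h <;> simp_all))
      (l.filter (fun x => !decide (bKey1 x = 0))) [] []
      (fun y hy => by simp at hy; exact hy.2) (by simp) (by simp)
  rw [List.nil_append] at s2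
  rw [s2]
  -- split off priority 2
  have s3 := foldl_insertBy_partition before2 (fun a => decide (bKey1 a = 2))
      (fun y => bKey1 y ≠ 0 ∧ bKey1 y ≠ 1)
      (fun x y hx hy h1 h2 => before2_of_k1_lt x y (by
        rcases bKey1_range y with h | h | h | h <;> simp_all))
      (fun x y hx hy h1 h2 => before2_of_k1_gt x y (by
        rcases bKey1_range x with h | h | h | h <;> simp_all))
      ((l.filter (fun x => !decide (bKey1 x = 0))).filter (fun x => !decide (bKey1 x = 1))) [] []
      (fun y hy => by simp at hy; exact ⟨hy.2.2, hy.2.1⟩) (by simp) (by simp)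
  rw [List.nil_append] at s3
  rw [s3]
  -- normalise the nested filters
  rw [List.filter_filter, List.filter_filter, List.filter_filter, List.filter_filter,
      List.filter_filter]
  simp only []
  have e1 : l.filter (fun a => decide (bKey1 a = 1) && !decide (bKey1 a = 0))
      = l.filter (fun a => decide (bKey1 a = 1)) :=
    List.filter_congr (fun a _ => by rcases bKey1_range a with h | h | h | h <;> simp [h])
  have e2 : l.filter (fun a => decide (bKey1 a = 2) && !decide (bKey1 a = 1) && !decide (bKey1 a = 0))
      = l.filter (fun a => decide (bKey1 a = 2)) :=
    List.filter_congr (fun a _ => by rcases bKey1_range a with h | h | h | h <;> simp [h])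
  have e3 : l.filter (fun a => !decide (bKey1 a = 2) && !decide (bKey1 a = 1) && !decide (bKey1 a = 0))
      = l.filter (fun a => decide (bKey1 a = 3)) :=
    List.filter_congr (fun a _ => by rcases bKey1_range a with h | h | h | h <;> simp [h])
  rw [e1, e2, e3]
  -- evaluate the four buckets
  rw [bucket_id 0 (by decide) _ (fun y hy => by simpa using (List.mem_filter.mp hy).2),
      bucket_id 1 (by decide) _ (fun y hy => by simpa using (List.mem_filter.mp hy).2),
      bucket_id 2 (by decide) _ (fun y hy => by simpa using (List.mem_filter.mp hy).2),
      bucket_ext _ (fun y hy => by simpa using (List.mem_filter.mp hy).2)]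
  simp [List.append_assoc]
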